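-- pv_equiv track=rewrite | github.com/pc5401/my_BOJ | 백준/Silver/25045. 비즈마켓/비즈마켓.py | solve
-- ===== SOURCE A (Python) =====
-- def solve(N: int, M: int, A: list[int], B: list[int]) -> int:
--     A.sort(reverse=True)
--     B.sort()
--     result = 0
--     j = 0
--     for a in A:
--         if j < M and B[j] <= a:
--             result += a - B[j]
--             j += 1
--     return result
-- ===== SOURCE B (Python) =====
-- def solve(N: int, M: int, A: list[int], B: list[int]) -> int:
--     A.sort(reverse=True)
--     B.sort()
--     return sum(max(0, a - b) for a, b in zip(A, B[:max(0, M)]))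
-- ===== Notes on version B (the rewrite author's own statement) =====
-- stated objective: simpler
-- what changed: Replaces the stateful pointer loop (running j index into B with a conditional advance) by a closed per-pair form: after sorting, the matched pairs are exactly the aligned pairs with non-negative surplus, so B sums max(0, a - b) over zip(A_desc, B_asc[:M]) with no pointer state.
import Mathlib
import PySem

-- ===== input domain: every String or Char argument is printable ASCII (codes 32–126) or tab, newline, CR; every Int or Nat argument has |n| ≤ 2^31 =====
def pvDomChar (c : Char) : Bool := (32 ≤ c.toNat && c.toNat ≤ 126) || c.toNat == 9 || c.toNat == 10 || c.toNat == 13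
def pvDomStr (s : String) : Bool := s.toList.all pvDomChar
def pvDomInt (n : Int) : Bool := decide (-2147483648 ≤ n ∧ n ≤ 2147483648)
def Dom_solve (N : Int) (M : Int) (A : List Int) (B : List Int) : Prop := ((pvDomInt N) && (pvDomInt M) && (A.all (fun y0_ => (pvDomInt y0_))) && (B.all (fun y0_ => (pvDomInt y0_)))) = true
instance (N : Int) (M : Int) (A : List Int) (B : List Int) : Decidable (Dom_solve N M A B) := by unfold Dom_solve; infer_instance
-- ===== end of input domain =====

-- B replaces A's pointer loop with a per-pair closed form over the zipped sorted lists (simpler; same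
-- asymptotic cost). Both A and B sort A and B in place (observable mutation); the equivalence proved
-- here is about the return value. Where A raises IndexError (see Pre_/Raises_ below), B returns a value.

-- ===== PORT A =====
-- Python's `for a in A: if j < M and B[j] <= a: ...`; the extra `j < B'.length` conjunct is a
-- totality guard only: when it is the deciding conjunct Python raises IndexError (excluded by Pre_).
def loopA (M : Int) (B' : List Int) : List Int → Int → Nat → Int
  | [], r, _ => r
  | a :: t, r, j =>
    if (j : Int) < M ∧ j < B'.length ∧ B'.getD j 0 ≤ a then
      loopA M B' t (r + (a - B'.getD j 0)) (j + 1)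
    else
      loopA M B' t r j

def solve (N : Int) (M : Int) (A : List Int) (B : List Int) : Int :=
  let A' := PySem.List.sorted A (fun x => x) true
  let B' := PySem.List.sorted B (fun x => x) false
  loopA M B' A' 0 0

-- ===== PORT B =====
-- B[:max(0,M)] = List.take M.toNat (Int.toNat clamps negatives to 0, exactly max(0, M)).
def solve_alt (N : Int) (M : Int) (A : List Int) (B : List Int) : Int :=
  let A' := PySem.List.sorted A (fun x => x) true
  let B' := PySem.List.sorted B (fun x => x) false
  ((A'.zip (B'.take M.toNat)).map (fun p => max 0 (p.1 - p.2))).sum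

-- ===== PRECONDITION & SPEC =====
-- Pre_ excludes exactly the inputs on which A raises IndexError: M > len(B), len(A) > len(B),
-- and every buyer in B is matched (each aligned sorted pair has B'[k] ≤ A'[k]), so the pointer
-- runs off the end of B.
def Pre_solve (N : Int) (M : Int) (A : List Int) (B : List Int) : Prop :=
  ¬ ((B.length : Int) < M ∧ B.length < A.length ∧
      ∀ k, k < B.length →
        (PySem.List.sorted B (fun x => x) false).getD k 0 ≤
          (PySem.List.sorted A (fun x => x) true).getD k 0)
instance (N : Int) (M : Int) (A : List Int) (B : List Int) : Decidable (Pre_solve N M A B) := by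
  unfold Pre_solve; infer_instance

def pvWitness_solve : Int × Int × List Int × List Int := (3, 2, [5, 3, 1], [1, 2, 4])

def Spec_solve (N : Int) (M : Int) (A : List Int) (B : List Int) (out : Int) : Prop := out = solve_alt N M A B
instance (N : Int) (M : Int) (A : List Int) (B : List Int) (out : Int) : Decidable (Spec_solve N M A B out) := by unfold Spec_solve; infer_instance

-- ===== CLAIM (what is proved, stated in full; the proofs are below) =====
def Claim_equal_solve : Prop := ∀ (N : Int) (M : Int) (A : List Int) (B : List Int), Dom_solve N M A B → Pre_solve N M A B → Spec_solve N M A B (solve N M A B)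

-- ===== LEMMAS AND PROOFS =====

-- Once the loop guard fails for every remaining seller, the loop returns its accumulator.
theorem loopA_stuck (M : Int) (B' : List Int) (X : List Int) (r : Int) (j : Nat)
    (h : ∀ x ∈ X, ¬ ((j : Int) < M ∧ j < B'.length ∧ B'.getD j 0 ≤ x)) :
    loopA M B' X r j = r := by
  induction X generalizing r with
  | nil => rfl
  | cons a t ih =>
    rw [loopA, if_neg (h a (List.mem_cons_self))]
    exact ih r (fun x hx => h x (List.mem_cons_of_mem _ hx))

-- Core invariant: from pointer position j, the loop adds exactly the positive surpluses of the
-- remaining aligned pairs, provided X is non-increasing and Y is non-decreasing.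
theorem loopA_eq_sum (M : Int) (Y : List Int) (hY : Y.Pairwise (· ≤ ·)) :
    ∀ (X : List Int), X.Pairwise (fun a b => b ≤ a) → ∀ (j : Nat) (r : Int),
    loopA M Y X r j =
      r + ((X.zip ((Y.take M.toNat).drop j)).map (fun p => max 0 (p.1 - p.2))).sum := by
  intro X
  induction X with
  | nil => intro _ j r; simp [loopA]
  | cons a t ih =>
    intro hX j r
    have ht : t.Pairwise (fun a b => b ≤ a) := (List.pairwise_cons.mp hX).2
    have ha : ∀ x ∈ t, x ≤ a := (List.pairwise_cons.mp hX).1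
    by_cases hg : (j : Int) < M ∧ j < Y.length ∧ Y.getD j 0 ≤ a
    · obtain ⟨hjM, hjY, hle⟩ := hg
      have hjm : j < M.toNat := by omega
      have hjt : j < (Y.take M.toNat).length := by
        simp [List.length_take]; omega
      have hdrop : (Y.take M.toNat).drop j
          = (Y.take M.toNat)[j] :: (Y.take M.toNat).drop (j + 1) :=
        List.drop_eq_getElem_cons hjt
      have hgetD : Y.getD j 0 = Y[j] := List.getD_eq_getElem Y 0 hjY
      have hget : (Y.take M.toNat)[j] = Y[j] := List.getElem_take
      rw [loopA, if_pos ⟨hjM, hjY, hle⟩, ih ht (j + 1) _, hdrop]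
      simp only [List.zip_cons_cons, List.map_cons, List.sum_cons, hget]
      rw [hgetD] at hle ⊢
      have : max 0 (a - Y[j]) = a - Y[j] := by omega
      rw [this]; ring
    · -- guard fails for a, hence (X non-increasing) for every remaining seller: loop is stuck
      have hstuck : loopA M Y (a :: t) r j = r := by
        apply loopA_stuck
        intro x hx
        rcases List.mem_cons.mp hx with rfl | hx'
        · exact hg
        · intro ⟨h1, h2, h3⟩
          exact hg ⟨h1, h2, le_trans h3 (ha x hx')⟩
      rw [hstuck]
      by_cases hin : (j : Int) < M ∧ j < Y.length
      · -- failure is B'[j] > a: every remaining aligned pair has zero surplus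
        obtain ⟨hjM, hjY⟩ := hin
        have hgt : a < Y.getD j 0 := by
          by_contra hc
          exact hg ⟨hjM, hjY, by omega⟩
        have hgetD : Y.getD j 0 = Y[j] := List.getD_eq_getElem Y 0 hjY
        rw [hgetD] at hgt
        have hzero : ∀ z ∈ ((a :: t).zip ((Y.take M.toNat).drop j)).map
            (fun p => max 0 (p.1 - p.2)), z = 0 := by
          intro z hz
          obtain ⟨p, hp, rfl⟩ := List.mem_map.mp hz
          have hp1 : p.1 ≤ a := by
            rcases List.mem_cons.mp (List.of_mem_zip hp).1 with h | h
            · exact le_of_eq h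
            · exact ha _ h
          have hp2 : Y[j] ≤ p.2 := by
            have hp2m := (List.of_mem_zip hp).2
            obtain ⟨i, hi, hgi⟩ := List.mem_iff_getElem.mp hp2m
            have hi' : j + i < (Y.take M.toNat).length := by
              simp [List.length_drop, List.length_take] at hi ⊢; omega
            rw [List.getElem_drop] at hgi
            have hiY : j + i < Y.length := by
              have := hi'; simp [List.length_take] at this; omega
            have : (Y.take M.toNat)[j + i] = Y[j + i] := List.getElem_take
            rw [this] at hgi
            rcases Nat.eq_zero_or_pos i with rfl | hpos
            · exact le_of_eq (by simpa using hgi)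
            · have := (List.pairwise_iff_getElem.mp hY) j (j + i) hjY hiY (by omega)
              rw [hgi] at this; exact this
          have : p.1 - p.2 ≤ 0 := by omega
          omega
        rw [List.sum_eq_zero hzero]; ring
      · -- pointer is at or past the cap / the end of B': no pairs remain
        have hlen : (Y.take M.toNat).length ≤ j := by
          simp only [List.length_take]
          rcases not_and_or.mp hin with h | h
          · have : M ≤ (j : Int) := by omega
            have : M.toNat ≤ j := by omega
            omega
          · omega
        rw [List.drop_eq_nil_of_le hlen]
        simp

-- ===== VERDICT (by name: the statement is the Claim_ definition above) =====
theorem solve_spec : Claim_equal_solve := by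
  intro N M A B _ _
  unfold Spec_solve solve solve_alt
  exact loopA_eq_sum M _ (PySem.List.sorted_pairwise B (fun x => x))
    _ (PySem.List.sorted_pairwise_rev A (fun x => x)) 0 0 |>.trans (by simp)
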